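-- pv_equiv track=rewrite | github.com/LewisStaples/advent_of_code_2018 | day22/day22.py | get_regional_geologic_indices
-- ===== SOURCE A (Python) =====
-- def get_erosion_level(geologic_index, depth):
--     return (geologic_index + depth) % 20183
--
-- def get_regional_geologic_indices(depth, target):
--     # This returns a list of lists of integers.
--     # Note that the indices are [y][x], which supports printing on the
--     # screen with x horizontal and y vertical.
--     regional_geologic_indices = list()
--     MAX_HEIGHT = max(16, target[1] + 1)
--     MAX_LENGTH = max(16, target[0] + 1)
--
--     # Top row (height == 0)
--     regional_geologic_indices.append(list())
--     for length in range(MAX_LENGTH):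
--         regional_geologic_indices[-1].append(16807 * length)
--
--     # Remaining rows
--     for height in range(1, MAX_HEIGHT):
--         regional_geologic_indices.append(list())
--         regional_geologic_indices[-1].append(48271 * height)
--         for length in range(1, MAX_LENGTH):
--             regional_geologic_indices[-1].append(
--                 get_erosion_level(regional_geologic_indices[-1][length - 1], depth)
--                 * get_erosion_level(regional_geologic_indices[-2][length], depth)
--             )
--             if (length, height) == target:
--                 # Set target's geologic index to zero
--                 regional_geologic_indices[-1][-1] = 0
--     return regional_geologic_indices
-- ===== SOURCE B (Python) =====
-- def get_regional_geologic_indices(depth, target):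
--     # Two-pass reformulation: first fill a grid of erosion levels E (each cell's
--     # erosion computed once), then reconstruct the geologic-index grid from E.
--     M = 20183
--     max_h = max(16, target[1] + 1)
--     max_l = max(16, target[0] + 1)
--     # pass 1: erosion levels
--     E = [[(16807 * x + depth) % M for x in range(max_l)]]
--     for y in range(1, max_h):
--         row = [(48271 * y + depth) % M]
--         for x, e_up in enumerate(E[-1][1:], 1):
--             row.append(depth % M if (x, y) == target else (row[-1] * e_up + depth) % M)
--         E.append(row)
--     # pass 2: geologic indices from the erosion levels
--     G = [[16807 * x for x in range(max_l)]]
--     for y, (up_row, row) in enumerate(zip(E, E[1:]), 1):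
--         G.append([48271 * y]
--                  + [0 if (x, y) == target else e_left * e_up
--                     for x, (e_left, e_up) in enumerate(zip(row, up_row[1:]), 1)])
--     return G
-- ===== Notes on version B (the rewrite author's own statement) =====
-- stated objective: alternative
-- what changed: B replaces A's single pass that recomputes erosion levels per cell by a two-pass scheme: first fill a grid of erosion levels (each computed once, via its own modular recurrence), then reconstruct the geologic-index grid from adjacent erosion levels.
import Mathlib
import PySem

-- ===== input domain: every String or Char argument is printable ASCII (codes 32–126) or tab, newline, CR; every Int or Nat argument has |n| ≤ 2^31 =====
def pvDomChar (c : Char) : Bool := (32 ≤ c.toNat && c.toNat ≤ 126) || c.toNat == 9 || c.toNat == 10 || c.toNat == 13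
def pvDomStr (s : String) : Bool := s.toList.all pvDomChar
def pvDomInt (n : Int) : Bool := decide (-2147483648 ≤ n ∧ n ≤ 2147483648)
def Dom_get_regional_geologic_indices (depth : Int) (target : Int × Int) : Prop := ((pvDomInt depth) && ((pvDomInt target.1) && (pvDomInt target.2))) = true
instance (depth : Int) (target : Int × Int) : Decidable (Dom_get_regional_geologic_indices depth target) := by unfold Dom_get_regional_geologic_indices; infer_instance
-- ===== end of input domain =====

-- B rebuilds the grid in two passes through an erosion-level grid (each erosion level
-- computed once) instead of A's single pass recomputing erosion levels per cell; objective: alternative.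

-- ===== PORT A =====
-- helper get_erosion_level(geologic_index, depth)
def pvEro (depth g : Int) : Int := PySem.Int.mod (g + depth) 20183

def get_regional_geologic_indices (depth : Int) (target : Int × Int) : List (List Int) :=
  let MH := max 16 (target.2 + 1)
  let ML := max 16 (target.1 + 1)
  -- top row: for length in range(MAX_LENGTH): append 16807*length
  let row0 := (PySem.List.pyRange 0 ML 1).foldl (fun r x => r ++ [16807 * x]) []
  -- remaining rows; Python appends the product then overwrites the last element with 0
  -- when (length, height) == target: ported as appending the conditional value.
  -- prev[length] is always in range (each row has MAX_LENGTH elements), so pyGetD's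
  -- default 0 is never used.
  (PySem.List.pyRange 1 MH 1).foldl (fun grid y =>
    let prev := grid.getLast!
    grid ++ [(PySem.List.pyRange 1 ML 1).foldl (fun cur x =>
      cur ++ [if (x, y) = target then 0
              else pvEro depth cur.getLast! * pvEro depth (PySem.List.pyGetD prev x 0)])
      [48271 * y]]) [row0]

-- ===== PORT B =====
def get_regional_geologic_indices_alt (depth : Int) (target : Int × Int) : List (List Int) :=
  let MH := max 16 (target.2 + 1)
  let ML := max 16 (target.1 + 1)
  -- pass 1: erosion levels
  let E := (PySem.List.pyRange 1 MH 1).foldl (fun E y =>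
    E ++ [(PySem.List.enumerate (E.getLast!.drop 1) 1).foldl (fun row p =>
      row ++ [if (p.1, y) = target then PySem.Int.mod depth 20183
              else PySem.Int.mod (row.getLast! * p.2 + depth) 20183])
      [PySem.Int.mod (48271 * y + depth) 20183]])
    [(PySem.List.pyRange 0 ML 1).map (fun x => PySem.Int.mod (16807 * x + depth) 20183)]
  -- pass 2: geologic indices from the erosion levels
  (PySem.List.enumerate (E.zip (E.drop 1)) 1).foldl (fun G q =>
    G ++ [48271 * q.1 ::
      (PySem.List.enumerate (q.2.2.zip (q.2.1.drop 1)) 1).map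
        (fun r => if (r.1, q.1) = target then 0 else r.2.1 * r.2.2)])
    [(PySem.List.pyRange 0 ML 1).map (fun x => 16807 * x)]

-- ===== PRECONDITION & SPEC =====
def Spec_get_regional_geologic_indices (depth : Int) (target : Int × Int) (out : List (List Int)) : Prop := out = get_regional_geologic_indices_alt depth target
instance (depth : Int) (target : Int × Int) (out : List (List Int)) : Decidable (Spec_get_regional_geologic_indices depth target out) := by unfold Spec_get_regional_geologic_indices; infer_instance

-- ===== CLAIM (what is proved, stated in full; the proofs are below) =====
def Claim_equal_get_regional_geologic_indices : Prop := ∀ (depth : Int) (target : Int × Int), Dom_get_regional_geologic_indices depth target → Spec_get_regional_geologic_indices depth target (get_regional_geologic_indices depth target)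

-- ===== LEMMAS AND PROOFS =====

-- A scan: each appended element is a function of the previous element only.
def pvScan {α β : Type} (f : α → β → α) : α → List β → List α
  | _, [] => []
  | a, x :: xs => f a x :: pvScan f (f a x) xs

theorem pvScan_cons {α β : Type} (f : α → β → α) (a : α) (x : β) (xs : List β) :
    pvScan f a (x :: xs) = f a x :: pvScan f (f a x) xs := rfl

theorem pvGetLast!_concat {α : Type} [Inhabited α] (l : List α) (a : α) :
    (l ++ [a]).getLast! = a := by
  induction l with
  | nil => rfl
  | cons y ys ih =>
    have h : ((y :: ys) ++ [a]).getLast? = some a := List.getLast?_concat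
    simp only [List.cons_append] at h
    simp [h]

-- an append-to-the-end fold whose new element depends only on the last element is a scan
theorem pvFoldl_concat {α β : Type} [Inhabited α] (f : α → β → α) :
    ∀ (l : List β) (cur : List α), cur ≠ [] →
    l.foldl (fun c x => c ++ [f c.getLast! x]) cur = cur ++ pvScan f cur.getLast! l := by
  intro l
  induction l with
  | nil => intro cur _; simp [pvScan]
  | cons x xs ih =>
    intro cur hc
    simp only [List.foldl_cons]
    rw [ih _ (by simp), pvGetLast!_concat, pvScan_cons, List.append_assoc]
    rfl

theorem pvScan_map {α β γ : Type} (f : α → γ → α) (φ : β → γ) :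
    ∀ (l : List β) (a : α), pvScan f a (l.map φ) = pvScan (fun a x => f a (φ x)) a l := by
  intro l
  induction l with
  | nil => intro a; rfl
  | cons x xs ih => intro a; simp only [List.map_cons, pvScan_cons]; rw [ih]

theorem pvScan_congr_inv {α β : Type} (P : α → Prop) (f g : α → β → α) :
    ∀ (l : List β) (a : α), P a → (∀ a x, P a → x ∈ l → f a x = g a x ∧ P (f a x)) →
    pvScan f a l = pvScan g a l := by
  intro l
  induction l with
  | nil => intro a _ _; rfl
  | cons x xs ih =>
    intro a ha hstep
    obtain ⟨heq, hP⟩ := hstep a x ha (by simp)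
    simp only [pvScan_cons, heq]
    rw [ih _ (heq ▸ hP) (fun a x hPa hx => hstep a x hPa (by simp [hx]))]

theorem pvScan_sim {α β : Type} (f g : α → β → α) (h : α → α)
    (hstep : ∀ a x, g (h a) x = h (f a x)) :
    ∀ (l : List β) (a : α), pvScan g (h a) l = (pvScan f a l).map h := by
  intro l
  induction l with
  | nil => intro a; rfl
  | cons x xs ih =>
    intro a
    simp only [pvScan_cons, List.map_cons, hstep a x]
    rw [← ih (f a x)]

theorem pvScan_length {α β : Type} (f : α → β → α) :
    ∀ (l : List β) (a : α), (pvScan f a l).length = l.length := by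
  intro l
  induction l with
  | nil => intro a; rfl
  | cons x xs ih => intro a; simp only [pvScan_cons, List.length_cons, ih]

theorem pvEnum_cons {α : Type} (x : α) (xs : List α) (s : Int) :
    PySem.List.enumerate (x :: xs) s = (s, x) :: PySem.List.enumerate xs (s + 1) := by
  simp [PySem.List.enumerate]

theorem pvEnum_map {α β : Type} (φ : α → β) :
    ∀ (xs : List α) (s : Int),
    PySem.List.enumerate (xs.map φ) s = (PySem.List.enumerate xs s).map (fun p => (p.1, φ p.2)) := by
  intro xs
  induction xs with
  | nil => intro s; simp
  | cons x xs ih => intro s; simp only [List.map_cons, pvEnum_cons, ih]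

-- canonical (scan) forms of the rows
def pvF (depth : Int) (target : Int × Int) (y : Int) : Int → Int × Int → Int :=
  fun a p => if (p.1, y) = target then 0 else pvEro depth a * pvEro depth p.2

def pvFE (depth : Int) (target : Int × Int) (y : Int) : Int → Int × Int → Int :=
  fun a p => if (p.1, y) = target then PySem.Int.mod depth 20183
             else PySem.Int.mod (a * p.2 + depth) 20183

def pvRowC (depth : Int) (target : Int × Int) (y : Int) (prev : List Int) : List Int :=
  48271 * y :: pvScan (pvF depth target y) (48271 * y) (PySem.List.enumerate (prev.drop 1) 1)

def pvRowE (depth : Int) (target : Int × Int) (y : Int) (prevE : List Int) : List Int :=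
  PySem.Int.mod (48271 * y + depth) 20183 ::
    pvScan (pvFE depth target y) (PySem.Int.mod (48271 * y + depth) 20183)
      (PySem.List.enumerate (prevE.drop 1) 1)

-- A's inner row loop equals the canonical scan form
theorem pvRowA_eq (depth : Int) (target : Int × Int) (y ML : Int) (prev : List Int)
    (hlen : prev.length = ML.toNat) (hML : 1 ≤ ML) :
    (PySem.List.pyRange 1 ML 1).foldl (fun cur x =>
      cur ++ [if (x, y) = target then 0
              else pvEro depth cur.getLast! * pvEro depth (PySem.List.pyGetD prev x 0)])
      [48271 * y] = pvRowC depth target y prev := by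
  have h := pvFoldl_concat
    (fun a x => if (x, y) = target then 0
                else pvEro depth a * pvEro depth (PySem.List.pyGetD prev x 0))
    (PySem.List.pyRange 1 ML 1) [48271 * y] (by simp)
  refine h.trans ?_
  have hfst : (PySem.List.enumerate (prev.drop 1) 1).map (fun p => p.1)
      = PySem.List.pyRange 1 ML 1 := by
    rw [PySem.List.map_fst_enumerate]
    congr 1
    simp only [List.length_drop, hlen]
    omega
  have hgl : ([48271 * y] : List Int).getLast! = 48271 * y := rfl
  rw [hgl, ← hfst, pvScan_map]
  show _ = ([48271 * y] : List Int) ++ _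
  congr 1
  apply pvScan_congr_inv (fun _ => True) _ _ _ _ trivial
  intro a p _ hp
  refine ⟨?_, trivial⟩
  rw [PySem.List.mem_enumerate_iff] at hp
  obtain ⟨k, hk, rfl⟩ := hp
  have h1 : 1 + (k : Int) < (prev.length : Int) := by
    simp only [List.length_drop] at hk; omega
  have hget : PySem.List.pyGetD prev (1 + (k : Int)) 0 = (prev.drop 1)[k] := by
    rw [PySem.List.pyGetD_eq_getElem prev 0 (by omega) h1]
    rw [List.getElem_drop]
    congr 1
  simp only [pvF, hget]

-- B's inner row loop equals the canonical scan form
theorem pvRowB_eq (depth : Int) (target : Int × Int) (y : Int) (prevE : List Int) :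
    (PySem.List.enumerate (prevE.drop 1) 1).foldl (fun row p =>
      row ++ [if (p.1, y) = target then PySem.Int.mod depth 20183
              else PySem.Int.mod (row.getLast! * p.2 + depth) 20183])
      [PySem.Int.mod (48271 * y + depth) 20183] = pvRowE depth target y prevE := by
  exact pvFoldl_concat
    (fun a p => if (p.1, y) = target then PySem.Int.mod depth 20183
                else PySem.Int.mod (a * p.2 + depth) 20183)
    (PySem.List.enumerate (prevE.drop 1) 1)
    [PySem.Int.mod (48271 * y + depth) 20183] (by simp)

-- erosion-level row is the pointwise erosion of the geologic-index row
theorem pvRowE_map (depth : Int) (target : Int × Int) (y : Int) (prev : List Int) :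
    pvRowE depth target y (prev.map (pvEro depth)) = (pvRowC depth target y prev).map (pvEro depth) := by
  simp only [pvRowE, pvRowC, List.map_cons]
  have hdrop : (prev.map (pvEro depth)).drop 1 = (prev.drop 1).map (pvEro depth) := by
    simp
  rw [hdrop, pvEnum_map, pvScan_map]
  have hstep : ∀ (a : Int) (p : Int × Int),
      (fun a x => pvFE depth target y a (x.1, pvEro depth x.2)) (pvEro depth a) p
        = pvEro depth (pvF depth target y a p) := by
    intro a p
    by_cases h : (p.1, y) = target <;> simp [pvF, pvFE, pvEro, h]
  exact congrArg _ (pvScan_sim _ _ (pvEro depth) hstep _ (48271 * y))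

theorem pvRowC_length (depth : Int) (target : Int × Int) (y : Int) (prev : List Int) :
    (pvRowC depth target y prev).length = max 1 prev.length := by
  simp only [pvRowC, List.length_cons, pvScan_length, PySem.List.length_enumerate,
    List.length_drop]
  omega

-- reconstruction of a row of geologic indices from the erosion rows
theorem pvRecon (depth : Int) (target : Int × Int) (y : Int) :
    ∀ (ps : List Int) (s a : Int),
    (PySem.List.enumerate
      (((a :: pvScan (pvF depth target y) a (PySem.List.enumerate ps s)).map (pvEro depth)).zip
        (ps.map (pvEro depth))) s).map
      (fun r => if (r.1, y) = target then 0 else r.2.1 * r.2.2)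
    = pvScan (pvF depth target y) a (PySem.List.enumerate ps s) := by
  intro ps
  induction ps with
  | nil => intro s a; simp [pvScan]
  | cons q qs ih =>
    intro s a
    simp only [pvEnum_cons, pvScan_cons, List.map_cons, List.zip_cons_cons]
    congr 1
    have := ih (s + 1) (pvF depth target y a (s, q))
    simp only [List.map_cons] at this
    exact this

-- the erosion grid built by pass 1, in canonical form
def pvEgrid (depth : Int) (target : Int × Int) (prev : List Int) (L : List Int) : List (List Int) :=
  prev.map (pvEro depth) ::
    pvScan (fun pe y => pvRowE depth target y pe) (prev.map (pvEro depth)) L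

def pvGRow (target : Int × Int) : Int × (List Int × List Int) → List Int :=
  fun q => 48271 * q.1 ::
    (PySem.List.enumerate (q.2.2.zip (q.2.1.drop 1)) 1).map
      (fun r => if (r.1, q.1) = target then 0 else r.2.1 * r.2.2)

-- grid level: the whole pass-2 reconstruction equals the scan of canonical A-rows
theorem pvGrid (depth : Int) (target : Int × Int) :
    ∀ (n : Nat) (s : Int) (prev : List Int),
    (PySem.List.enumerate
      ((pvEgrid depth target prev (PySem.List.pyRange s (s + n) 1)).zip
        ((pvEgrid depth target prev (PySem.List.pyRange s (s + n) 1)).drop 1)) s).map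
      (pvGRow target)
    = pvScan (fun pr y => pvRowC depth target y pr) prev (PySem.List.pyRange s (s + n) 1) := by
  intro n
  induction n with
  | zero =>
    intro s prev
    rw [PySem.List.pyRange_one_eq_nil (by simp)]
    simp [pvEgrid, pvScan]
  | succ n ih =>
    intro s prev
    have hcons : PySem.List.pyRange s (s + ((n + 1 : Nat) : Int)) 1
        = s :: PySem.List.pyRange (s + 1) ((s + 1) + (n : Int)) 1 := by
      have harg : s + ((n + 1 : Nat) : Int) = (s + 1) + (n : Int) := by push_cast; ring
      rw [PySem.List.pyRange_one_cons (by push_cast; omega), harg]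
    rw [hcons]
    simp only [pvEgrid, pvScan_cons]
    rw [pvRowE_map]
    simp only [List.drop_one, List.tail_cons, List.zip_cons_cons, pvEnum_cons, List.map_cons]
    congr 1
    · -- head row: reconstruction from the two erosion rows gives back the A-row
      simp only [pvGRow, pvRowC, List.map_cons]
      congr 1
      have hdrop : (prev.map (pvEro depth)).drop 1 = (prev.drop 1).map (pvEro depth) := by
        simp
      rw [hdrop]
      have := pvRecon depth target s (prev.drop 1) 1 (48271 * s)
      simp only [List.map_cons] at this
      exact this
    · have := ih (s + 1) (pvRowC depth target s prev)
      simp only [pvEgrid, List.drop_one, List.tail_cons] at this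
      exact this

-- canonical form of port A
theorem pvA_eq (depth : Int) (target : Int × Int) :
    get_regional_geologic_indices depth target
      = (PySem.List.pyRange 0 (max 16 (target.1 + 1)) 1).map (fun x => 16807 * x) ::
        pvScan (fun pr y => pvRowC depth target y pr)
          ((PySem.List.pyRange 0 (max 16 (target.1 + 1)) 1).map (fun x => 16807 * x))
          (PySem.List.pyRange 1 (max 16 (target.2 + 1)) 1) := by
  have h16 : (16 : Int) ≤ max 16 (target.1 + 1) := le_max_left _ _
  simp only [get_regional_geologic_indices]
  rw [PySem.List.foldl_append_singleton_eq_map]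
  rw [pvFoldl_concat
    (fun prev y => (PySem.List.pyRange 1 (max 16 (target.1 + 1)) 1).foldl (fun cur x =>
      cur ++ [if (x, y) = target then 0
              else pvEro depth cur.getLast! * pvEro depth (PySem.List.pyGetD prev x 0)])
      [48271 * y])
    (PySem.List.pyRange 1 (max 16 (target.2 + 1)) 1) _ (by simp)]
  simp only [List.nil_append, List.cons_append]
  have hgl : ([(PySem.List.pyRange 0 (max 16 (target.1 + 1)) 1).map (fun x : Int => 16807 * x)]).getLast!
      = (PySem.List.pyRange 0 (max 16 (target.1 + 1)) 1).map (fun x : Int => 16807 * x) := rfl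
  rw [hgl]
  congr 1
  apply pvScan_congr_inv (fun l => l.length = (max 16 (target.1 + 1)).toNat)
  · simp [PySem.List.length_pyRange_one]
  · intro a x hP _
    constructor
    · exact pvRowA_eq depth target x (max 16 (target.1 + 1)) a hP (by omega)
    · rw [pvRowA_eq depth target x (max 16 (target.1 + 1)) a hP (by omega)]
      rw [pvRowC_length]
      omega

-- canonical form of port B
theorem pvB_eq (depth : Int) (target : Int × Int) :
    get_regional_geologic_indices_alt depth target
      = (PySem.List.pyRange 0 (max 16 (target.1 + 1)) 1).map (fun x => 16807 * x) ::
        pvScan (fun pr y => pvRowC depth target y pr)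
          ((PySem.List.pyRange 0 (max 16 (target.1 + 1)) 1).map (fun x => 16807 * x))
          (PySem.List.pyRange 1 (max 16 (target.2 + 1)) 1) := by
  have h16 : (16 : Int) ≤ max 16 (target.2 + 1) := le_max_left _ _
  simp only [get_regional_geologic_indices_alt]
  rw [pvFoldl_concat
    (fun pe y => (PySem.List.enumerate (pe.drop 1) 1).foldl (fun row p =>
      row ++ [if (p.1, y) = target then PySem.Int.mod depth 20183
              else PySem.Int.mod (row.getLast! * p.2 + depth) 20183])
      [PySem.Int.mod (48271 * y + depth) 20183])
    (PySem.List.pyRange 1 (max 16 (target.2 + 1)) 1) _ (by simp)]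
  have hE0 : ((PySem.List.pyRange 0 (max 16 (target.1 + 1)) 1).map (fun x : Int => 16807 * x)).map (pvEro depth)
      = (PySem.List.pyRange 0 (max 16 (target.1 + 1)) 1).map
          (fun x => PySem.Int.mod (16807 * x + depth) 20183) := by
    rw [List.map_map]; rfl
  have hgl : ([(PySem.List.pyRange 0 (max 16 (target.1 + 1)) 1).map
      (fun x : Int => PySem.Int.mod (16807 * x + depth) 20183)]).getLast!
      = (PySem.List.pyRange 0 (max 16 (target.1 + 1)) 1).map
          (fun x : Int => PySem.Int.mod (16807 * x + depth) 20183) := rfl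
  rw [hgl]
  have hscan : pvScan
      (fun pe y => (PySem.List.enumerate (pe.drop 1) 1).foldl (fun row p =>
        row ++ [if (p.1, y) = target then PySem.Int.mod depth 20183
                else PySem.Int.mod (row.getLast! * p.2 + depth) 20183])
        [PySem.Int.mod (48271 * y + depth) 20183])
      ((PySem.List.pyRange 0 (max 16 (target.1 + 1)) 1).map
        (fun x : Int => PySem.Int.mod (16807 * x + depth) 20183))
      (PySem.List.pyRange 1 (max 16 (target.2 + 1)) 1)
      = pvScan (fun pe y => pvRowE depth target y pe)
        ((PySem.List.pyRange 0 (max 16 (target.1 + 1)) 1).map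
          (fun x : Int => PySem.Int.mod (16807 * x + depth) 20183))
        (PySem.List.pyRange 1 (max 16 (target.2 + 1)) 1) := by
    apply pvScan_congr_inv (fun _ => True) _ _ _ _ trivial
    intro a x _ _
    exact ⟨pvRowB_eq depth target x a, trivial⟩
  rw [hscan]
  rw [PySem.List.foldl_append_singleton_eq_map]
  have hGRow : (fun q : Int × (List Int × List Int) => 48271 * q.1 ::
      (PySem.List.enumerate (q.2.2.zip (q.2.1.drop 1)) 1).map
        (fun r => if (r.1, q.1) = target then 0 else r.2.1 * r.2.2)) = pvGRow target := rfl
  rw [hGRow]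
  simp only [List.nil_append, List.cons_append]
  congr 1
  have hMH : (1 : Int) + (((max 16 (target.2 + 1)) - 1).toNat : Int) = max 16 (target.2 + 1) := by
    omega
  have := pvGrid depth target ((max 16 (target.2 + 1)) - 1).toNat 1
    ((PySem.List.pyRange 0 (max 16 (target.1 + 1)) 1).map (fun x : Int => 16807 * x))
  rw [hMH] at this
  simp only [pvEgrid, hE0] at this
  exact this

-- ===== VERDICT (by name: the statement is the Claim_ definition above) =====
theorem get_regional_geologic_indices_spec : Claim_equal_get_regional_geologic_indices := by
  intro depth target _
  show get_regional_geologic_indices depth target = get_regional_geologic_indices_alt depth target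
  rw [pvA_eq, pvB_eq]
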